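-- pv_equiv track=rewrite | github.com/nermadie/CodeForces_Solutions | CodeforcesRound1037Div3/prob03.py | solve
-- ===== SOURCE A (Python) =====
-- def solve(n, k, h):
--     cur_height = h[k - 1]
--     h = sorted(list(set(h)))
--     h_index = h.index(cur_height)
--     cur_water = 0
--     for i in range(h_index + 1, len(h)):
--         if h[i - 1] < h[i] - h[i - 1] + cur_water:
--             return "NO"
--         else:
--             cur_water += h[i] - h[i - 1]
--     return "YES"
-- ===== SOURCE B (Python) =====
-- def solve(n, k, h):
--     c = h[k - 1]
--     for b in h:
--         if b > c and not any(b - c <= y < b for y in h):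
--             return "NO"
--     return "YES"
-- ===== Notes on version B (the rewrite author's own statement) =====
-- stated objective: alternative
-- what changed: B drops A's sort/dedup/index preamble and running cur_water scan entirely: it answers NO by a direct double quantifier over the raw list - some height b above h[k-1] has no height in the half-open interval [b-h[k-1], b); correct because that interval is empty exactly when the sorted-distinct predecessor of b is more than h[k-1] below it.
import Mathlib
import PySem

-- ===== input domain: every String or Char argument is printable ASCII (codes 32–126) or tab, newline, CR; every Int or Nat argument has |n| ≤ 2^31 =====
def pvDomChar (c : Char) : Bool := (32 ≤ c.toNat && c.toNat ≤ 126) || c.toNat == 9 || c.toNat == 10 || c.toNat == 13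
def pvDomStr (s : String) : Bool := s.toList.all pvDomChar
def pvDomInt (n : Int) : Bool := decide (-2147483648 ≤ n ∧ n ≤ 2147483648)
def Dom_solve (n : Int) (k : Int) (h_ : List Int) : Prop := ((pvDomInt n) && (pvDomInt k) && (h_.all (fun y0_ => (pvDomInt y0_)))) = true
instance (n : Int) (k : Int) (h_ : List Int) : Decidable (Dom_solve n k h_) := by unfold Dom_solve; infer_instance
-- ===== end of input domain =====

-- B avoids A's sort/dedup/index preamble and running water sum: it tests directly on the
-- raw list whether some height b above h[k-1] has no height in [b - h[k-1], b).

-- ===== PORT A =====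
-- the loop body of A: state = (early-return value if any, cur_water)
def solveStep (h : List Int) (st : Option String × Int) (i : Int) : Option String × Int :=
  match st.1 with
  | some _ => st
  | none =>
    if PySem.List.pyGetD h (i - 1) 0 < PySem.List.pyGetD h i 0 - PySem.List.pyGetD h (i - 1) 0 + st.2 then
      (some "NO", st.2)
    else
      (none, st.2 + (PySem.List.pyGetD h i 0 - PySem.List.pyGetD h (i - 1) 0))

def solve (n : Int) (k : Int) (h_ : List Int) : String :=
  let cur_height := PySem.List.pyGetD h_ (k - 1) 0
  let h := PySem.List.sorted (PySem.Set.ofList h_) (fun x => x) false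
  let h_index : Nat := (PySem.List.index? h cur_height).getD 0
  let st := (PySem.List.pyRange ((h_index : Int) + 1) (h.length : Int) 1).foldl (solveStep h) (none, 0)
  match st.1 with
  | some s => s
  | none => "YES"

-- ===== PORT B =====
def solve_alt (n : Int) (k : Int) (h_ : List Int) : String :=
  let c := PySem.List.pyGetD h_ (k - 1) 0
  if h_.any (fun b => decide (c < b) && !(h_.any (fun y => decide (b - c ≤ y) && decide (y < b)))) then
    "NO"
  else
    "YES"

-- ===== PRECONDITION & SPEC =====
-- Pre_ excludes exactly the inputs where A raises IndexError on h[k-1] (B raises there too).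
def Pre_solve (n : Int) (k : Int) (h_ : List Int) : Prop := PySem.Raise.InRange h_.length (k - 1)
instance (n : Int) (k : Int) (h_ : List Int) : Decidable (Pre_solve n k h_) := by unfold Pre_solve; infer_instance
def pvWitness_solve : Int × Int × List Int := (3, 1, [1, 2, 3])
def Spec_solve (n : Int) (k : Int) (h_ : List Int) (out : String) : Prop := out = solve_alt n k h_
instance (n : Int) (k : Int) (h_ : List Int) (out : String) : Decidable (Spec_solve n k h_ out) := by unfold Spec_solve; infer_instance

-- ===== CLAIM (what is proved, stated in full; the proofs are below) =====
def Claim_equal_solve : Prop := ∀ (n : Int) (k : Int) (h_ : List Int), Dom_solve n k h_ → Pre_solve n k h_ → Spec_solve n k h_ (solve n k h_)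

-- ===== LEMMAS AND PROOFS =====

theorem getD_append_cons (pre : List Int) (a : Int) (t : List Int) (d : Int) :
    (pre ++ a :: t).getD pre.length d = a := by
  induction pre with
  | nil => rfl
  | cons x xs ih => simpa using ih

theorem foldl_solveStep_some (h : List Int) (l : List Int) (s : String) (w : Int) :
    l.foldl (solveStep h) (some s, w) = (some s, w) := by
  induction l with
  | nil => rfl
  | cons i l ih => simpa [List.foldl, solveStep] using ih

-- A's loop from index pre.length+1 with cur_water = a - c equals the gap test on a :: t.
theorem loop_lemma (c : Int) (t : List Int) : ∀ (pre : List Int) (a : Int),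
    ((PySem.List.pyRange ((pre.length : Int) + 1) (((pre ++ a :: t).length : Int)) 1).foldl
        (solveStep (pre ++ a :: t)) (none, a - c)).1
      = if ((a :: t).zip t).any (fun p => decide (p.2 - p.1 > c)) then some "NO" else none := by
  induction t with
  | nil =>
    intro pre a
    rw [PySem.List.pyRange_one_eq_nil (by simp)]
    simp
  | cons b t ih =>
    intro pre a
    have hlt : (pre.length : Int) + 1 < ((pre ++ a :: b :: t).length : Int) := by
      simp
    rw [PySem.List.pyRange_one_cons hlt]
    have hsplit : pre ++ a :: b :: t = (pre ++ [a]) ++ b :: t := by simp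
    have hga : PySem.List.pyGetD (pre ++ a :: b :: t) ((pre.length : Int) + 1 - 1) 0 = a := by
      have : (pre.length : Int) + 1 - 1 = ((pre.length : Nat) : Int) := by ring
      rw [this, PySem.List.pyGetD_natCast, getD_append_cons]
    have hgb : PySem.List.pyGetD (pre ++ a :: b :: t) ((pre.length : Int) + 1) 0 = b := by
      have h1 : (pre.length : Int) + 1 = (((pre ++ [a]).length : Nat) : Int) := by
        simp
      rw [h1, PySem.List.pyGetD_natCast, hsplit, getD_append_cons]
    simp only [List.foldl]
    by_cases hc : c < b - a
    · have : solveStep (pre ++ a :: b :: t) (none, a - c) ((pre.length : Int) + 1) = (some "NO", a - c) := by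
        simp only [solveStep, hga, hgb]
        rw [if_pos (show a < b - a + (a - c) by omega)]
      rw [this, foldl_solveStep_some]
      simp [hc]
    · have hstep : solveStep (pre ++ a :: b :: t) (none, a - c) ((pre.length : Int) + 1) = (none, b - c) := by
        simp only [solveStep, hga, hgb]
        rw [if_neg (show ¬ a < b - a + (a - c) by omega)]
        have : a - c + (b - a) = b - c := by ring
        rw [this]
      rw [hstep]
      have hlen : ((pre.length : Int) + 1) + 1 = ((pre ++ [a]).length : Int) + 1 := by simp
      have := ih (pre ++ [a]) b
      rw [hsplit, hlen]
      rw [this]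
      simp only [List.zip_cons_cons, List.any_cons]
      have hd : decide (b - a > c) = false := decide_eq_false (by omega)
      simp only [hd, Bool.false_or]

-- adjacent-pair characterization of the gap test
theorem any_zip_tail_iff (f : Int × Int → Bool) : ∀ (L : List Int),
    ((L.zip L.tail).any f = true) ↔
      ∃ l1 a b l2, L = l1 ++ a :: b :: l2 ∧ f (a, b) = true := by
  intro L
  induction L with
  | nil =>
    simp only [List.zip_nil_left, List.any_nil, Bool.false_eq_true, false_iff]
    rintro ⟨l1, a, b, l2, hd, -⟩
    have := congrArg List.length hd
    simp at this
  | cons x L ih =>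
    cases L with
    | nil =>
      simp only [List.tail_cons, List.zip_nil_right, List.any_nil, Bool.false_eq_true, false_iff]
      rintro ⟨l1, a, b, l2, hd, -⟩
      have := congrArg List.length hd
      simp at this
      omega
    | cons y L' =>
      constructor
      · intro hany
        simp only [List.tail_cons, List.zip_cons_cons, List.any_cons, Bool.or_eq_true] at hany
        rcases hany with hf | hrest
        · exact ⟨[], x, y, L', rfl, hf⟩
        · obtain ⟨l1, a, b, l2, hd, hf⟩ := ih.mp (by simpa using hrest)
          exact ⟨x :: l1, a, b, l2, by simp [hd], hf⟩
      · rintro ⟨l1, a, b, l2, hd, hf⟩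
        simp only [List.tail_cons, List.zip_cons_cons, List.any_cons, Bool.or_eq_true]
        cases l1 with
        | nil =>
          cases hd
          exact Or.inl hf
        | cons z l1' =>
          have hz : y :: L' = l1' ++ a :: b :: l2 := by
            simpa using congrArg List.tail hd
          right
          simpa using ih.mpr ⟨l1', a, b, l2, hz, hf⟩

-- in a strictly sorted list P ++ a :: b :: l2, any member below b is at most a
theorem le_pred_of_lt (P l2 : List Int) (a b y : Int)
    (hp : (P ++ a :: b :: l2).Pairwise (· < ·)) (hy : y ∈ P ++ a :: b :: l2) (hyb : y < b) :
    y ≤ a := by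
  rcases List.pairwise_append.mp hp with ⟨-, htl, hrel⟩
  rcases List.mem_append.mp hy with hyP | hyT
  · exact le_of_lt (hrel y hyP a (by simp))
  · rcases List.mem_cons.mp hyT with rfl | hyT2
    · exact le_refl y
    · rcases List.mem_cons.mp hyT2 with rfl | hyl2
      · omega
      · have := (List.pairwise_cons.mp (List.pairwise_cons.mp htl).2).1 y hyl2
        omega

-- the gap test on the strictly sorted tail c :: suf equals the interval-emptiness quantifier
theorem gap_iff (c : Int) (pre suf : List Int)
    (hp : (pre ++ c :: suf).Pairwise (· < ·)) :
    (((c :: suf).zip suf).any (fun p => decide (p.2 - p.1 > c)) = true) ↔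
      ∃ b ∈ pre ++ c :: suf, c < b ∧ ∀ y ∈ pre ++ c :: suf, ¬(b - c ≤ y ∧ y < b) := by
  have htl : (c :: suf).Pairwise (· < ·) := (List.pairwise_append.mp hp).2.1
  have hsuf : ∀ x ∈ suf, c < x := (List.pairwise_cons.mp htl).1
  have hzip : ((c :: suf).zip suf) = ((c :: suf).zip (c :: suf).tail) := rfl
  rw [hzip, any_zip_tail_iff]
  constructor
  · rintro ⟨l1, a, b, l2, hd, hf⟩
    have hgap : b - a > c := by simpa using of_decide_eq_true hf
    have ha_mem : a ∈ c :: suf := by rw [hd]; simp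
    have hac : c ≤ a := by
      rcases List.mem_cons.mp ha_mem with rfl | hmem
      · exact le_refl a
      · exact le_of_lt (hsuf a hmem)
    have hab : a < b := by
      have := (hd ▸ htl : (l1 ++ a :: b :: l2).Pairwise (· < ·))
      exact (List.pairwise_cons.mp (List.pairwise_append.mp this).2.1).1 b (by simp)
    have hdec2 : pre ++ c :: suf = (pre ++ l1) ++ a :: b :: l2 := by
      rw [hd]; simp
    refine ⟨b, by rw [hdec2]; simp, by omega, ?_⟩
    intro y hy hiv
    have : y ≤ a := le_pred_of_lt (pre ++ l1) l2 a b y (hdec2 ▸ hp) (hdec2 ▸ hy) hiv.2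
    omega
  · rintro ⟨b, hbm, hbc, hint⟩
    have hbsuf : b ∈ suf := by
      rcases List.mem_append.mp hbm with hbp | hbt
      · have := (List.pairwise_append.mp hp).2.2 b hbp c (by simp)
        omega
      · rcases List.mem_cons.mp hbt with rfl | h
        · omega
        · exact h
    obtain ⟨s1, s2, hsd⟩ := List.append_of_mem hbsuf
    rcases List.eq_nil_or_concat (c :: s1) with hnil | ⟨init, a, hca⟩
    · simp at hnil
    · have hd : c :: suf = init ++ a :: b :: s2 := by
        rw [hsd, show c :: (s1 ++ b :: s2) = (c :: s1) ++ b :: s2 by simp, hca]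
        simp
      have ha_mem : a ∈ c :: suf := by rw [hd]; simp
      have hac : c ≤ a := by
        rcases List.mem_cons.mp ha_mem with rfl | hmem
        · exact le_refl a
        · exact le_of_lt (hsuf a hmem)
      have hab : a < b := by
        have := (hd ▸ htl : (init ++ a :: b :: s2).Pairwise (· < ·))
        exact (List.pairwise_cons.mp (List.pairwise_append.mp this).2.1).1 b (by simp)
      have hna : ¬(b - c ≤ a ∧ a < b) := hint a (by
        rcases List.mem_cons.mp ha_mem with rfl | hmem
        · simp
        · simp [hmem])
      exact ⟨init, a, b, s2, hd, decide_eq_true (by omega)⟩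

theorem solve_eq_alt (n k : Int) (h_ : List Int) (hp : Pre_solve n k h_) :
    solve n k h_ = solve_alt n k h_ := by
  have hp' : PySem.Raise.InRange h_.length (k - 1) := hp
  have hmem : PySem.List.pyGetD h_ (k - 1) 0 ∈
      PySem.List.sorted (PySem.Set.ofList h_) (fun x => x) false := by
    rw [PySem.List.mem_sorted, PySem.Set.mem_ofList]
    exact PySem.List.pyGetD_mem h_ 0 hp'
  have hidx := (PySem.List.index?_isSome_iff _ _).mpr hmem
  obtain ⟨j, hj⟩ := Option.isSome_iff_exists.mp hidx
  obtain ⟨pre, suf, hdec, hlen, -⟩ := (PySem.List.index?_eq_some_iff _ _ _).mp hj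
  have hjD : (PySem.List.index? (PySem.List.sorted (PySem.Set.ofList h_) (fun x => x) false)
      (PySem.List.pyGetD h_ (k - 1) 0)).getD 0 = j := by rw [hj]; rfl
  have hpair : (pre ++ PySem.List.pyGetD h_ (k - 1) 0 :: suf).Pairwise (· < ·) := by
    rw [← hdec]; exact PySem.List.sorted_ofList_pairwise_lt (xs := h_)
  have hl := loop_lemma (PySem.List.pyGetD h_ (k - 1) 0) suf pre (PySem.List.pyGetD h_ (k - 1) 0)
  rw [sub_self, ← hdec, hlen] at hl
  have hmemiff : ∀ x, x ∈ pre ++ PySem.List.pyGetD h_ (k - 1) 0 :: suf ↔ x ∈ h_ := fun x => by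
    rw [← hdec, PySem.List.mem_sorted, PySem.Set.mem_ofList]
  have halt : (h_.any (fun b => decide (PySem.List.pyGetD h_ (k - 1) 0 < b) &&
        !(h_.any (fun y => decide (b - PySem.List.pyGetD h_ (k - 1) 0 ≤ y) && decide (y < b)))))
      = ((PySem.List.pyGetD h_ (k - 1) 0 :: suf).zip suf).any
          (fun p => decide (p.2 - p.1 > PySem.List.pyGetD h_ (k - 1) 0)) := by
    rw [Bool.eq_iff_iff]
    rw [gap_iff _ pre suf hpair]
    simp only [List.any_eq_true, Bool.and_eq_true, Bool.not_eq_true', List.any_eq_false,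
      decide_eq_true_eq, hmemiff]
  unfold solve solve_alt
  simp only [hjD, hl, halt]
  by_cases hb : ((PySem.List.pyGetD h_ (k - 1) 0 :: suf).zip suf).any
      (fun p => decide (p.2 - p.1 > PySem.List.pyGetD h_ (k - 1) 0)) = true
  · simp [hb]
  · simp [hb]

-- ===== VERDICT (by name: the statement is the Claim_ definition above) =====
theorem solve_spec : Claim_equal_solve := by
  intro n k h_ _ hp
  unfold Spec_solve
  exact solve_eq_alt n k h_ hp
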